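-- pv_equiv track=rewrite | github.com/3PointCode/TextGenerator | bigram_model.py | successors_generator
-- ===== SOURCE A (Python) =====
-- def successors_generator(reader):
--     successor_map = {}
--     context_window = []
--     for line in reader:
--         for word in line.split():
--             cleaned_word = word.strip('.,;-"'":?-'!()_{}[]").lower()
--             context_window.append(cleaned_word)
--
--             if len(context_window) == 2:
--                 key = context_window[0]
--                 value = context_window[1]
--                 if key in successor_map:
--                     successor_map[key].append(value)
--                 else:
--                     successor_map[key] = [value]
--                 context_window.pop(0)
--
--     return successor_map
-- ===== SOURCE B (Python) =====
-- def successors_generator(reader):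
--     # Group-by formulation: materialize the consecutive-pair list by index, then
--     # build each key's complete successor bucket at once over the ordered
--     # de-duplicated head words, instead of growing dict entries pair by pair.
--     words = [w.strip('.,;-"'":?-'!()_{}[]").lower()
--              for line in reader for w in line.split()]
--     pairs = [(words[i], words[i + 1]) for i in range(len(words) - 1)]
--     result = {}
--     for key in dict.fromkeys(h for h, _ in pairs):
--         result[key] = [t for h, t in pairs if h == key]
--     return result
-- ===== Notes on version B (the rewrite author's own statement) =====
-- stated objective: alternative
-- what changed: B replaces A's streaming dict-building (a rolling two-word window appending one successor per step) by a group-by: it materializes the token and consecutive-pair lists, de-duplicates the head words in order, and computes each key's entire successor bucket in one filtering pass per key.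
import Mathlib
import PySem

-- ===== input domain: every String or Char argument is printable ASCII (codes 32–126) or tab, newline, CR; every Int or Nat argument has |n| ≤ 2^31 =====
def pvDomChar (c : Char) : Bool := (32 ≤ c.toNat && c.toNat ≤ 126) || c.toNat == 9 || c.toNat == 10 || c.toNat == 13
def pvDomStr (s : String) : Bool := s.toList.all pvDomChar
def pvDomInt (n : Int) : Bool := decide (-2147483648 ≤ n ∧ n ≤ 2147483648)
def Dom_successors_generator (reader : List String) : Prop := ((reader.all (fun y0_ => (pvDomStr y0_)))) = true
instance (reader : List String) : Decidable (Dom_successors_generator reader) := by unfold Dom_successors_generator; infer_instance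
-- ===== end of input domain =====

-- B replaces A's streaming rolling-window dict-building by a group-by: materialized pair
-- list, ordered de-dup of head words, one full filtering pass per key (alternative decomposition).


-- ===== PORT A =====
-- word.strip('.,;-"'":?-'!()_{}[]").lower()  (the two adjacent Python literals concatenated)
def sgClean (w : String) : String :=
  PySem.Str.lower (PySem.Str.stripChars w ".,;-\":?-'!()_{}[]")

-- body of A's inner loop: state = (successor_map, context_window)
def sgStepA (st : PySem.Dict String (List String) × List String) (word : String) :
    PySem.Dict String (List String) × List String :=
  let cleaned_word := sgClean word
  let cw := st.2 ++ [cleaned_word]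
  if cw.length == 2 then
    let key := PySem.List.pyGetD cw 0 ""
    let value := PySem.List.pyGetD cw 1 ""
    let d := if st.1.contains key then st.1.insert key (st.1.getD key [] ++ [value])
             else st.1.insert key [value]
    (d, cw.drop 1)  -- context_window.pop(0)
  else (st.1, cw)

def successors_generator (reader : List String) : List (String × List String) :=
  (reader.foldl (fun st line => (PySem.Str.split₀ line).foldl sgStepA st)
    ((PySem.Dict.empty : PySem.Dict String (List String)), ([] : List String))).1.items

-- ===== PORT B =====
-- Source B: words, then pairs = [(words[i], words[i+1]) for i in range(len(words)-1)],
-- then for key in dict.fromkeys(heads): result[key] = [t for h, t in pairs if h == key]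
def successors_generator_alt (reader : List String) : List (String × List String) :=
  let words := reader.flatMap (fun line => (PySem.Str.split₀ line).map sgClean)
  let pairs := (PySem.List.pyRange 0 ((words.length : Int) - 1) 1).map
      (fun i => (PySem.List.pyGetD words i "", PySem.List.pyGetD words (i + 1) ""))
  ((PySem.List.dedup (pairs.map Prod.fst)).foldl
     (fun result key =>
        result.insert key ((pairs.filter (fun p => p.1 == key)).map Prod.snd))
     (PySem.Dict.empty : PySem.Dict String (List String))).items

-- ===== PRECONDITION & SPEC =====
def Spec_successors_generator (reader : List String) (out : List (String × List String)) : Prop := out = successors_generator_alt reader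
instance (reader : List String) (out : List (String × List String)) : Decidable (Spec_successors_generator reader out) := by unfold Spec_successors_generator; infer_instance

-- ===== CLAIM (what is proved, stated in full; the proofs are below) =====
def Claim_equal_successors_generator : Prop := ∀ (reader : List String), Dom_successors_generator reader → Spec_successors_generator reader (successors_generator reader)

-- ===== LEMMAS AND PROOFS =====

-- A's inner-loop body on an already-cleaned token (proof helper; sgStepA = sgStep2 after cleaning)
def sgStep2 (st : PySem.Dict String (List String) × List String) (w : String) :
    PySem.Dict String (List String) × List String :=
  let cw := st.2 ++ [w]
  if cw.length == 2 then
    let key := PySem.List.pyGetD cw 0 ""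
    let value := PySem.List.pyGetD cw 1 ""
    let d := if st.1.contains key then st.1.insert key (st.1.getD key [] ++ [value])
             else st.1.insert key [value]
    (d, cw.drop 1)
  else (st.1, cw)

-- A's update branch is exactly Dict.modify
theorem sg_branch_eq_modify (d : PySem.Dict String (List String)) (k v : String) :
    (if d.contains k then d.insert k (d.getD k [] ++ [v]) else d.insert k [v])
      = d.modify k [] (· ++ [v]) := by
  by_cases h : d.contains k
  · simp [PySem.Dict.modify, PySem.Dict.getD, h]
  · have h0 : d.get? k = none := by
      rw [PySem.Dict.get?_eq_none_iff_contains]; simp_all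
    simp [PySem.Dict.modify, PySem.Dict.getD, h, h0]

-- step on a one-word window [p]: emit the pair (p, w), keep window [w]
theorem sgStep2_pair (d : PySem.Dict String (List String)) (p w : String) :
    sgStep2 (d, [p]) w = (d.modify p [] (· ++ [w]), [w]) := by
  simp [sgStep2, PySem.List.pyGetD, PySem.List.pyGet?, PySem.List.pyIdx?, ← sg_branch_eq_modify]

-- step on the empty window: dict untouched, window [w]
theorem sgStep2_first (d : PySem.Dict String (List String)) (w : String) :
    sgStep2 (d, []) w = (d, [w]) := by
  simp [sgStep2]

-- the rolling-window fold over cleaned tokens = fold over consecutive pairs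
theorem sg_window_fold (ws : List String) (d : PySem.Dict String (List String)) (p : String) :
    (ws.foldl sgStep2 (d, [p])).1
      = ((p :: ws).zip ws).foldl (fun d q => d.modify q.1 [] (· ++ [q.2])) d := by
  induction ws generalizing d p with
  | nil => rfl
  | cons w ws ih =>
      simp only [List.foldl_cons, List.zip_cons_cons, sgStep2_pair]
      exact ih _ _

-- A's whole computation = pair-fold over zip words (words.drop 1)
theorem sgA_eq_pairfold (reader : List String) :
    successors_generator reader
      = (((reader.flatMap (fun line => (PySem.Str.split₀ line).map sgClean)).zip
            ((reader.flatMap (fun line => (PySem.Str.split₀ line).map sgClean)).drop 1)).foldl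
           (fun d q => d.modify q.1 [] (· ++ [q.2]))
           (PySem.Dict.empty : PySem.Dict String (List String))).items := by
  unfold successors_generator
  rw [← List.foldl_flatMap]
  have h1 : (reader.flatMap PySem.Str.split₀).foldl sgStepA
        ((PySem.Dict.empty : PySem.Dict String (List String)), ([] : List String))
      = ((reader.flatMap PySem.Str.split₀).map sgClean).foldl sgStep2
        ((PySem.Dict.empty : PySem.Dict String (List String)), ([] : List String)) := by
    rw [List.foldl_map]; rfl
  have h2 : reader.flatMap (fun line => (PySem.Str.split₀ line).map sgClean)
      = (reader.flatMap PySem.Str.split₀).map sgClean := by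
    rw [List.map_flatMap]
  rw [h2, h1]
  generalize (reader.flatMap PySem.Str.split₀).map sgClean = words
  cases words with
  | nil => rfl
  | cons p ws =>
      simp only [List.foldl_cons, sgStep2_first, List.drop_succ_cons, List.drop_zero]
      rw [sg_window_fold]

-- B's index-built pair list IS zip xs (xs.drop 1)
theorem sg_pairs_eq_zip (xs : List String) :
    (PySem.List.pyRange 0 ((xs.length : Int) - 1) 1).map
        (fun i => (PySem.List.pyGetD xs i "", PySem.List.pyGetD xs (i + 1) ""))
      = xs.zip (xs.drop 1) := by
  apply List.ext_getElem
  · simp [PySem.List.length_pyRange_one]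
  · intro i h1 h2
    have hi : i < xs.length - 1 := by
      simpa [PySem.List.length_pyRange_one] using h1
    simp only [List.getElem_map, PySem.List.getElem_pyRange_one, List.getElem_zip,
      List.getElem_drop]
    have e2 : (i : Int) + 1 = ((i + 1 : Nat) : Int) := by push_cast; omega
    rw [show (0 : Int) + (i : Int) = ((i : Nat) : Int) by omega, e2,
      PySem.List.pyGetD_natCast, PySem.List.pyGetD_natCast,
      List.getD_eq_getElem xs "" (show i < xs.length by omega),
      List.getD_eq_getElem xs "" (show i + 1 < xs.length by omega)]
    exact Prod.ext rfl (by simp [Nat.add_comm i 1])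

-- pair-fold items = ordered-dedup of heads mapped to their filtered buckets (the group-by)
theorem sg_pairfold_items (ps : List (String × String)) :
    ((ps.foldl (fun d q => d.modify q.1 [] (· ++ [q.2]))
        (PySem.Dict.empty : PySem.Dict String (List String))).items)
      = (PySem.List.dedup (ps.map Prod.fst)).map
          (fun k => (k, (ps.filter (fun p => p.1 == k)).map Prod.snd)) := by
  have hnd : ((ps.foldl (fun d q => d.modify q.1 [] (· ++ [q.2]))
      (PySem.Dict.empty : PySem.Dict String (List String))).keys).Nodup := by
    exact PySem.Dict.nodup_keys_foldl_modify_key ps Prod.fst [] (fun d q => (· ++ [q.2])) _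
      PySem.Dict.nodup_keys_empty
  rw [PySem.Dict.items_eq_map_keys _ hnd []]
  have hkeys : (ps.foldl (fun d q => d.modify q.1 [] (· ++ [q.2]))
      (PySem.Dict.empty : PySem.Dict String (List String))).keys
      = PySem.List.dedup (ps.map Prod.fst) := by
    rw [PySem.Dict.keys_foldl_modify_key, PySem.Dict.keys_empty, PySem.List.dedup_eq_ofList]
    rfl
  rw [hkeys]
  apply List.map_congr_left
  intro k _
  rw [PySem.Dict.getD_foldl_modify_append]
  simp

-- B's group-by loop appends fresh distinct keys
theorem sg_alt_items (ps : List (String × String)) :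
    ((PySem.List.dedup (ps.map Prod.fst)).foldl
       (fun result key =>
          result.insert key ((ps.filter (fun p => p.1 == key)).map Prod.snd))
       (PySem.Dict.empty : PySem.Dict String (List String))).items
      = (PySem.List.dedup (ps.map Prod.fst)).map
          (fun k => (k, (ps.filter (fun p => p.1 == k)).map Prod.snd)) := by
  have := PySem.Dict.items_foldl_insert_fresh
    (l := PySem.List.dedup (ps.map Prod.fst))
    (k := fun x => x)
    (v := fun k => (ps.filter (fun p => p.1 == k)).map Prod.snd)
    (d := (PySem.Dict.empty : PySem.Dict String (List String)))
    (by intro a _; simp [PySem.Dict.contains_empty])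
    (by simp)
  simp only [PySem.List.dedup_eq_ofList] at this ⊢
  rw [this]
  simp [PySem.Dict.empty]

-- ===== VERDICT (by name: the statement is the Claim_ definition above) =====
theorem successors_generator_spec : Claim_equal_successors_generator := by
  intro reader _
  show successors_generator reader = successors_generator_alt reader
  rw [sgA_eq_pairfold]
  unfold successors_generator_alt
  simp only [sg_pairs_eq_zip]
  rw [sg_pairfold_items, sg_alt_items]
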